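-- pv_equiv track=rewrite | github.com/trixirt/rocFFT | scripts/perf/perflib/html.py | token_to_size_description
-- ===== SOURCE A (Python) =====
-- def token_to_length(tokens):
--     length = []
--     for token in tokens:
--         words = token.split("_")
--         for idx in range(len(words)):
--             if(words[idx] == "len"):
--                 lenidx = idx + 1
--                 thislength = []
--                 while lenidx < len(words) and words[lenidx].isnumeric():
--                     thislength.append(int(words[lenidx]))
--                     lenidx += 1
--                 length.append(thislength)
--     return length
--
-- def token_to_batch(tokens):
--     batch = []
--     for token in tokens:
--         words = token.split("_")
--         for idx in range(len(words)):
--             if(words[idx] == "batch"):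
--                 batchidx = idx + 1
--                 thisbatch = []
--                 while batchidx < len(words) and words[batchidx].isnumeric():
--                     thisbatch.append(int(words[batchidx]))
--                     batchidx += 1
--                 batch.append(thisbatch)
--     return batch
--
-- def token_to_size_description(tokens):
--     length = token_to_length(tokens)
--     batch = token_to_batch(tokens)
--     descriptions = []
--     for cur_len, cur_batch in zip(length, batch):
--         def join_ints(ints):
--             return 'x'.join([str(val) for val in ints])
--         desc = join_ints(cur_len) + 'b' + join_ints(cur_batch)
--         descriptions.append(desc)
--     return descriptions
-- ===== SOURCE B (Python) =====
-- def _num_run(words):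
--     run = []
--     for v in words:
--         if not v.isnumeric():
--             break
--         run.append(int(v))
--     return run
--
-- def token_to_size_description(tokens):
--     lengths, batches = [], []
--     for token in tokens:
--         rest = token.split("_")
--         while rest:
--             w, rest = rest[0], rest[1:]
--             if w == "len":
--                 lengths.append(_num_run(rest))
--             elif w == "batch":
--                 batches.append(_num_run(rest))
--     return ['x'.join(map(str, l)) + 'b' + 'x'.join(map(str, b))
--             for l, b in zip(lengths, batches)]
-- ===== Notes on version B (the rewrite author's own statement) =====
-- stated objective: simpler
-- what changed: Replaces the two independent index-based whole-stream scans (token_to_length then token_to_batch) by one combined pass over successive tails of each token's word list, collecting both run lists at once, then formats the zipped pairs.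
import Mathlib
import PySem

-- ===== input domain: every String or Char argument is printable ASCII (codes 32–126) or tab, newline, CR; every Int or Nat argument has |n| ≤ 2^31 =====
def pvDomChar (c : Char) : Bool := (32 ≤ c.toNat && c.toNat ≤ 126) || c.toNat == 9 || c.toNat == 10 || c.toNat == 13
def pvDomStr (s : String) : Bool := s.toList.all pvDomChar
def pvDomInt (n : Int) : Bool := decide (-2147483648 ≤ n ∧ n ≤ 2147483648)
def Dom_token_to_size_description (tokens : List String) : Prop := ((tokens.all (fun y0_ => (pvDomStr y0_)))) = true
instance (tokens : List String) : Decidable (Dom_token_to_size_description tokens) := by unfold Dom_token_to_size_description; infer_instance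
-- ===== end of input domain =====

-- B makes one combined pass over successive tails of each token's word list instead of
-- A's two independent index-based whole-stream scans; same cost, simpler decomposition.
-- '.isnumeric()' is ported as PySem.Str.strIsdigit and 'int(w)' as (ofStr? w).getD 0:
-- exact on the ASCII domain Dom (there isnumeric = isdigit, and int() succeeds on digit runs).

-- ===== PORT A =====
-- words = token.split("_")  (sep "_" is nonempty, so split? is some; getD [] is never taken)
def pvWords (token : String) : List String := (PySem.Str.split? token "_").getD []

-- the inner 'while lenidx < len(words) and words[lenidx].isnumeric(): append int(...); idx += 1'
def pvWhileRun (words : List String) (i : Nat) : List Int :=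
  if h : i < words.length then
    if PySem.Str.strIsdigit (words.getD i "") then
      ((PySem.Int.ofStr? (words.getD i "")).getD 0) :: pvWhileRun words (i + 1)
    else []
  else []
termination_by words.length - i

def token_to_length (tokens : List String) : List (List Int) :=
  tokens.foldl (fun length token =>
    (List.range (pvWords token).length).foldl (fun length idx =>
      if (pvWords token).getD idx "" == "len" then length ++ [pvWhileRun (pvWords token) (idx + 1)]
      else length) length) []

def token_to_batch (tokens : List String) : List (List Int) :=
  tokens.foldl (fun batch token =>
    (List.range (pvWords token).length).foldl (fun batch idx =>
      if (pvWords token).getD idx "" == "batch" then batch ++ [pvWhileRun (pvWords token) (idx + 1)]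
      else batch) batch) []

def pvJoinInts (ints : List Int) : String :=
  PySem.Str.join "x" (ints.map PySem.Int.toStr)

def token_to_size_description (tokens : List String) : List String :=
  let length := token_to_length tokens
  let batch := token_to_batch tokens
  (List.zip length batch).foldl (fun descriptions p =>
    descriptions ++ [pvJoinInts p.1 ++ "b" ++ pvJoinInts p.2]) []

-- ===== PORT B =====
-- Source B's _num_run: numeric prefix of a word list
def pvNumRun : List String → List Int
  | [] => []
  | v :: ws =>
    if PySem.Str.strIsdigit v then ((PySem.Int.ofStr? v).getD 0) :: pvNumRun ws else []

-- Source B's 'while rest:' loop: one pass collecting both accumulators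
def pvScan : List String → List (List Int) × List (List Int) → List (List Int) × List (List Int)
  | [], acc => acc
  | w :: rest, (ls, bs) =>
    if w == "len" then pvScan rest (ls ++ [pvNumRun rest], bs)
    else if w == "batch" then pvScan rest (ls, bs ++ [pvNumRun rest])
    else pvScan rest (ls, bs)

def token_to_size_description_alt (tokens : List String) : List String :=
  let p := tokens.foldl (fun acc token => pvScan (pvWords token) acc) ([], [])
  (List.zip p.1 p.2).map (fun q =>
    PySem.Str.join "x" (q.1.map PySem.Int.toStr) ++ "b" ++
    PySem.Str.join "x" (q.2.map PySem.Int.toStr))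

-- ===== PRECONDITION & SPEC =====
def Spec_token_to_size_description (tokens : List String) (out : List String) : Prop := out = token_to_size_description_alt tokens
instance (tokens : List String) (out : List String) : Decidable (Spec_token_to_size_description tokens out) := by unfold Spec_token_to_size_description; infer_instance

-- ===== CLAIM (what is proved, stated in full; the proofs are below) =====
def Claim_equal_token_to_size_description : Prop := ∀ (tokens : List String), Dom_token_to_size_description tokens → Spec_token_to_size_description tokens (token_to_size_description tokens)

-- ===== LEMMAS AND PROOFS =====

-- the runs B collects from a word list, written structurally
def pvRuns (key : String) : List String → List (List Int)
  | [] => []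
  | w :: rest => (if w == key then [pvNumRun rest] else []) ++ pvRuns key rest

theorem pvWhileRun_eq_numRun_drop (words : List String) (i : Nat) :
    pvWhileRun words i = pvNumRun (words.drop i) := by
  induction hn : words.length - i using Nat.strong_induction_on generalizing i with
  | _ n ih =>
    rw [pvWhileRun]
    by_cases h : i < words.length
    · have hd : words.drop i = words.getD i "" :: words.drop (i + 1) := by
        rw [List.getD_eq_getElem _ _ h, ← List.getElem_cons_drop h]
      rw [hd, pvNumRun]
      simp only [h, dif_pos]
      split
      · rw [ih (words.length - (i + 1)) (by omega) (i + 1) rfl]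
      · rfl
    · have hle : words.length ≤ i := by omega
      rw [List.drop_eq_nil_of_le hle]
      simp [h, pvNumRun]

theorem inner_fold_eq_runs (key : String) (words : List String) (acc : List (List Int)) :
    (List.range words.length).foldl (fun acc idx =>
      if words.getD idx "" == key then acc ++ [pvWhileRun words (idx + 1)] else acc) acc
    = acc ++ pvRuns key words := by
  induction words generalizing acc with
  | nil => simp [pvRuns]
  | cons w rest ih =>
    rw [List.length_cons, List.range_succ_eq_map, List.foldl_cons, List.foldl_map]
    have hstep : (fun (acc : List (List Int)) (idx : Nat) =>
        if (w :: rest).getD (idx + 1) "" == key then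
          acc ++ [pvWhileRun (w :: rest) (idx + 1 + 1)] else acc)
        = (fun acc idx =>
          if rest.getD idx "" == key then acc ++ [pvWhileRun rest (idx + 1)] else acc) := by
      funext acc idx
      simp only [List.getD_cons_succ, pvWhileRun_eq_numRun_drop, List.drop_succ_cons]
    rw [hstep, ih, pvRuns]
    simp only [List.getD_cons_zero, pvWhileRun_eq_numRun_drop, List.drop_succ_cons,
      List.drop_zero]
    by_cases hk : (w == key) = true <;> simp [hk]

theorem pvScan_eq (words : List String) (ls bs : List (List Int)) :
    pvScan words (ls, bs) = (ls ++ pvRuns "len" words, bs ++ pvRuns "batch" words) := by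
  induction words generalizing ls bs with
  | nil => simp [pvScan, pvRuns]
  | cons w rest ih =>
    rw [pvScan, pvRuns, pvRuns]
    by_cases hl : (w == "len") = true
    · have hb : (w == "batch") = false := by
        have := eq_of_beq hl; subst this; decide
      simp [hl, hb, ih]
    · by_cases hb : (w == "batch") = true
      · simp [hl, hb, ih]
      · simp [hl, hb, ih]

theorem outer_fold_eq (key : String) (tokens : List String) (acc : List (List Int)) :
    tokens.foldl (fun acc token =>
      (List.range (pvWords token).length).foldl (fun acc idx =>
        if (pvWords token).getD idx "" == key then acc ++ [pvWhileRun (pvWords token) (idx + 1)]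
        else acc) acc) acc
    = acc ++ tokens.flatMap (fun t => pvRuns key (pvWords t)) := by
  induction tokens generalizing acc with
  | nil => simp
  | cons t rest ih =>
    rw [List.foldl_cons, inner_fold_eq_runs, ih, List.flatMap_cons, List.append_assoc]

theorem scan_fold_eq (tokens : List String) (ls bs : List (List Int)) :
    tokens.foldl (fun acc token => pvScan (pvWords token) acc) (ls, bs)
    = (ls ++ tokens.flatMap (fun t => pvRuns "len" (pvWords t)),
       bs ++ tokens.flatMap (fun t => pvRuns "batch" (pvWords t))) := by
  induction tokens generalizing ls bs with
  | nil => simp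
  | cons t rest ih =>
    rw [List.foldl_cons, pvScan_eq, ih]
    simp [List.append_assoc]

-- ===== VERDICT (by name: the statement is the Claim_ definition above) =====
theorem token_to_size_description_spec : Claim_equal_token_to_size_description := by
  intro tokens _
  unfold Spec_token_to_size_description token_to_size_description token_to_size_description_alt
  unfold token_to_length token_to_batch
  rw [scan_fold_eq, outer_fold_eq, outer_fold_eq]
  rw [PySem.List.foldl_append_singleton_eq_map]
  simp [pvJoinInts]
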